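-- pv_equiv track=rewrite | github.com/AaronVNguyen/AaronVNguyen.github.io | Python_Samples/Image_modifier/groups.py | groups_of_3
-- ===== SOURCE A (Python) =====
-- def groups_of_3(values):
-- 	newList = []
-- 	oldList = [i for x in values for i in x]
--
-- 	for i in range(0, len(oldList)-2, 3):
-- 		newList.append([oldList[i], oldList[i+1], oldList[i+2]])
-- 	if len(oldList) % 3 == 2:
-- 		newList.append([oldList[-2], oldList[-1]])
-- 	elif len(oldList) % 3 == 1:
-- 		newList.append([oldList[-1]])
--
-- 	return newList
-- ===== SOURCE B (Python) =====
-- def groups_of_3(values):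
--     result = []
--     buf = []
--     for x in values:
--         for i in x:
--             buf.append(i)
--             if len(buf) == 3:
--                 result.append(buf)
--                 buf = []
--     if buf:
--         result.append(buf)
--     return result
-- ===== Notes on version B (the rewrite author's own statement) =====
-- stated objective: simpler
-- what changed: Replaces flatten-then-index-range slicing with remainder branches by a single accumulate-and-flush pass over the elements maintaining a current buffer, with no index arithmetic.
import Mathlib
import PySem

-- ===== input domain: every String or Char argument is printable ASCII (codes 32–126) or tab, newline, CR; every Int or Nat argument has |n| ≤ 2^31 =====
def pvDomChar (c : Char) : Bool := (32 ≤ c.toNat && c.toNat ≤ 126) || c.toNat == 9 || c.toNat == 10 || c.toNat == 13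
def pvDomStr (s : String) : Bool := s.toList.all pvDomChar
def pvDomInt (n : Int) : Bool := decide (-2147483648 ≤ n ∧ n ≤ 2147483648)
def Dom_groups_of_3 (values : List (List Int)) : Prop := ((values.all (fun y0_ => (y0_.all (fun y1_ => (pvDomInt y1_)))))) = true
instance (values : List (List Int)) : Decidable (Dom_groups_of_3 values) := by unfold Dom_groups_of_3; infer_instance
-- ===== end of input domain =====

-- B replaces A's flatten-then-index-range chunking (mod-3 remainder branches, negative
-- indexing) by a single accumulate-and-flush pass keeping a current buffer (objective: simpler).


-- ===== PORT A =====
-- oldList[i] is ported as pyGetD with default 0; every index A reads is in range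
-- (the loop stops at len-2; the tail reads run only when len % 3 ∈ {1,2}),
-- so the default is never taken — Python A never raises, and the port is exact.
def groups_of_3 (values : List (List Int)) : List (List Int) :=
  let oldList : List Int := values.foldl (fun acc x => acc ++ x) []
  let newList : List (List Int) :=
    (PySem.List.pyRange 0 ((oldList.length : Int) - 2) 3).foldl
      (fun acc i => acc ++ [[PySem.List.pyGetD oldList i 0,
                             PySem.List.pyGetD oldList (i+1) 0,
                             PySem.List.pyGetD oldList (i+2) 0]]) []
  if PySem.Int.mod (oldList.length : Int) 3 = 2 then
    newList ++ [[PySem.List.pyGetD oldList (-2) 0, PySem.List.pyGetD oldList (-1) 0]]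
  else if PySem.Int.mod (oldList.length : Int) 3 = 1 then
    newList ++ [[PySem.List.pyGetD oldList (-1) 0]]
  else newList

-- ===== PORT B =====
-- B's loop body: append i to the buffer; flush the buffer into the result at size 3
def bstep (st : List (List Int) × List Int) (i : Int) : List (List Int) × List Int :=
  let buf := st.2 ++ [i]
  if buf.length = 3 then (st.1 ++ [buf], ([] : List Int)) else (st.1, buf)

def groups_of_3_alt (values : List (List Int)) : List (List Int) :=
  let st : List (List Int) × List Int :=
    values.foldl (fun st x => x.foldl bstep st) ([], [])
  if st.2 ≠ [] then st.1 ++ [st.2] else st.1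

-- ===== PRECONDITION & SPEC =====
def Spec_groups_of_3 (values : List (List Int)) (out : List (List Int)) : Prop := out = groups_of_3_alt values
instance (values : List (List Int)) (out : List (List Int)) : Decidable (Spec_groups_of_3 values out) := by unfold Spec_groups_of_3; infer_instance

-- ===== CLAIM (what is proved, stated in full; the proofs are below) =====
def Claim_equal_groups_of_3 : Prop := ∀ (values : List (List Int)), Dom_groups_of_3 values → Spec_groups_of_3 values (groups_of_3 values)

-- ===== LEMMAS AND PROOFS =====

-- the complete leading triples of a list, and its (length < 3) trailing remainder
def trips3 : List Int → List (List Int)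
  | [] => []
  | [_] => []
  | [_, _] => []
  | a :: b :: c :: t => [a, b, c] :: trips3 t

def rem3 : List Int → List Int
  | [] => []
  | [a] => [a]
  | [a, b] => [a, b]
  | _ :: _ :: _ :: t => rem3 t

theorem rem3_length (s : List Int) : (rem3 s).length = s.length % 3 := by
  induction s using rem3.induct <;> simp [rem3] <;> omega

-- B's flush loop computes the triples plus the pending remainder buffer
theorem bstep_inv (l : List Int) : ∀ (acc : List (List Int)) (buf : List Int), buf.length ≤ 2 →
    l.foldl bstep (acc, buf) = (acc ++ trips3 (buf ++ l), rem3 (buf ++ l)) := by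
  induction l with
  | nil =>
    intro acc buf h
    rcases buf with _ | ⟨a, _ | ⟨b, _ | ⟨c, t⟩⟩⟩ <;> simp [trips3, rem3] at h ⊢
  | cons i l ih =>
    intro acc buf h
    rcases buf with _ | ⟨a, _ | ⟨b, _ | ⟨c, t⟩⟩⟩
    · rw [List.foldl_cons, show bstep (acc, ([] : List Int)) i = (acc, [i]) from rfl,
        ih acc [i] (by simp)]
      rfl
    · rw [List.foldl_cons, show bstep (acc, [a]) i = (acc, [a, i]) from rfl,
        ih acc [a, i] (by simp)]
      rfl
    · rw [List.foldl_cons, show bstep (acc, [a, b]) i = (acc ++ [[a, b, i]], []) from rfl,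
        ih (acc ++ [[a, b, i]]) [] (by simp)]
      simp [trips3, rem3]
    · simp at h

-- pyGetD with a negative in-range index skips a leading cons
theorem pyGetD_cons_neg (x : Int) (xs : List Int) (i : Int) (d : Int)
    (h1 : i < 0) (h2 : -(xs.length : Int) ≤ i) :
    PySem.List.pyGetD (x :: xs) i d = PySem.List.pyGetD xs i d := by
  unfold PySem.List.pyGetD
  rw [PySem.List.pyGet?_neg _ h1 (by simp; omega), PySem.List.pyGet?_neg _ h1 h2]
  have hk : (-i).toNat ≤ xs.length := by omega
  rw [show (x :: xs).length - (-i).toNat = (xs.length - (-i).toNat) + 1 by simp; omega]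
  rw [List.getElem?_cons_succ]

-- pyGetD at a nonnegative index shifted past three leading conses
theorem pyGetD_cons3 (a b c : Int) (t : List Int) (i : Int) (d : Int) (h : 0 ≤ i) :
    PySem.List.pyGetD (a :: b :: c :: t) (i + 3) d = PySem.List.pyGetD t i d := by
  rw [PySem.List.pyGetD_of_nonneg _ _ (by omega), PySem.List.pyGetD_of_nonneg _ _ h]
  rw [show (i + 3).toNat = ((i.toNat + 2) + 1) by omega]
  rw [List.getD_cons_succ, show i.toNat + 2 = (i.toNat + 1) + 1 from rfl,
      List.getD_cons_succ, List.getD_cons_succ]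

-- A's index-range loop produces exactly the complete triples
theorem tripsMap (s : List Int) :
    (PySem.List.pyRange 0 ((s.length : Int) - 2) 3).map
      (fun i => [PySem.List.pyGetD s i 0, PySem.List.pyGetD s (i+1) 0, PySem.List.pyGetD s (i+2) 0])
    = trips3 s := by
  induction s using trips3.induct with
  | case1 => rfl
  | case2 a => rfl
  | case3 a b => rfl
  | case4 a b c t ih =>
    rw [PySem.List.pyRange_of_pos _ _ (by norm_num)] at ih ⊢
    have hN : (if (0:Int) < ((a :: b :: c :: t).length : Int) - 2 then
        ((((a :: b :: c :: t).length : Int) - 2 - 0 + 3 - 1)/3).toNat else 0)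
      = (if (0:Int) < ((t.length : Int)) - 2 then ((((t.length : Int)) - 2 - 0 + 3 - 1)/3).toNat else 0) + 1 := by
      simp only [List.length_cons]
      push_cast
      split_ifs <;> omega
    rw [hN, List.range_succ_eq_map, List.map_cons, List.map_cons, List.map_map, List.map_map]
    rw [show trips3 (a::b::c::t) = [a,b,c] :: trips3 t from rfl]
    refine congrArg₂ _ ?_ ?_
    · norm_num
      simp [pysem]
    · rw [← ih, List.map_map]
      refine List.map_congr_left (fun k _ => ?_)
      simp only [Function.comp_apply]
      have e0 : (0:Int) + 3 * ((k.succ : Nat) : Int) = ((0:Int) + 3 * (k : Int)) + 3 := by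
        push_cast; ring
      have e1 : (((0:Int) + 3 * (k : Int)) + 3) + 1 = (((0:Int) + 3 * (k : Int)) + 1) + 3 := by ring
      have e2 : (((0:Int) + 3 * (k : Int)) + 3) + 2 = (((0:Int) + 3 * (k : Int)) + 2) + 3 := by ring
      rw [e0, e1, e2, pyGetD_cons3 _ _ _ _ _ _ (by positivity),
          pyGetD_cons3 _ _ _ _ _ _ (by positivity), pyGetD_cons3 _ _ _ _ _ _ (by positivity)]

-- A's mod-3 remainder branches produce exactly the remainder group
theorem tailEq (s : List Int) :
    (if PySem.Int.mod ((s.length : Int)) 3 = 2 then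
       [[PySem.List.pyGetD s (-2) 0, PySem.List.pyGetD s (-1) 0]]
     else if PySem.Int.mod ((s.length : Int)) 3 = 1 then
       [[PySem.List.pyGetD s (-1) 0]]
     else [])
    = (if rem3 s ≠ [] then [rem3 s] else ([] : List (List Int))) := by
  induction s using rem3.induct with
  | case1 => rfl
  | case2 a => rfl
  | case3 a b => rfl
  | case4 a b c t ih =>
    have hmod : PySem.Int.mod (((a::b::c::t).length : Int)) 3 = ((t.length % 3 : Nat) : Int) := by
      rw [show (((a::b::c::t).length : Int)) = ((t.length + 3 : Nat) : Int) by push_cast [List.length_cons]; ring,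
          show (3:Int) = ((3:Nat):Int) from rfl, PySem.Int.mod_natCast,
          show (t.length + 3) % 3 = t.length % 3 by omega]
    have hmodt : PySem.Int.mod (((t.length : Nat) : Int)) 3 = ((t.length % 3 : Nat) : Int) := by
      rw [show (3:Int) = ((3:Nat):Int) from rfl, PySem.Int.mod_natCast]
    rw [hmodt] at ih
    have hrem : rem3 (a::b::c::t) = rem3 t := rfl
    have h3 : t.length % 3 = 0 ∨ t.length % 3 = 1 ∨ t.length % 3 = 2 := by omega
    rcases h3 with h3 | h3 | h3
    · rw [hmod, h3]
      have : rem3 t = [] := by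
        have := rem3_length t; rw [h3] at this; exact List.eq_nil_of_length_eq_zero this
      simp [hrem, this]
    · have ht : 1 ≤ t.length := by omega
      rw [hmod, h3,
          pyGetD_cons_neg a (b::c::t) (-1) 0 (by norm_num) (by push_cast [List.length_cons]; omega),
          pyGetD_cons_neg b (c::t) (-1) 0 (by norm_num) (by push_cast [List.length_cons]; omega),
          pyGetD_cons_neg c t (-1) 0 (by norm_num) (by omega)]
      rw [h3] at ih
      norm_num at ih ⊢
      rw [hrem]; exact ih
    · have ht : 2 ≤ t.length := by omega
      rw [hmod, h3,
          pyGetD_cons_neg a (b::c::t) (-2) 0 (by norm_num) (by push_cast [List.length_cons]; omega),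
          pyGetD_cons_neg b (c::t) (-2) 0 (by norm_num) (by push_cast [List.length_cons]; omega),
          pyGetD_cons_neg c t (-2) 0 (by norm_num) (by omega),
          pyGetD_cons_neg a (b::c::t) (-1) 0 (by norm_num) (by push_cast [List.length_cons]; omega),
          pyGetD_cons_neg b (c::t) (-1) 0 (by norm_num) (by push_cast [List.length_cons]; omega),
          pyGetD_cons_neg c t (-1) 0 (by norm_num) (by omega)]
      rw [h3] at ih
      norm_num at ih ⊢
      rw [hrem]; exact ih

-- ===== VERDICT (by name: the statement is the Claim_ definition above) =====
theorem groups_of_3_spec : Claim_equal_groups_of_3 := by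
  intro values _
  unfold Spec_groups_of_3 groups_of_3 groups_of_3_alt
  rw [PySem.List.foldl_append_eq_flatten, ← List.foldl_flatten (f := bstep),
      bstep_inv _ [] [] (by simp)]
  simp only [List.nil_append]
  rw [PySem.List.foldl_append_singleton_eq_map]
  simp only [List.nil_append]
  have h1 := tripsMap values.flatten
  have h2 := tailEq values.flatten
  split_ifs at h2 ⊢ with hc1 hc2 hc2 <;> simp_all
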